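-- pv_equiv track=rewrite | github.com/iamlogand/advent-of-code-solutions | 03/solution.py | findSharedItems
-- ===== SOURCE A (Python) =====
-- def findSharedItems(compartments):
--     sharedItems = []
--     for compartment in compartments:
--         for item in compartment:
--             isSharedItem = True
--             for otherCompartment in compartments:
--                 if compartment != otherCompartment and item not in otherCompartment:
--                     isSharedItem = False
--             if isSharedItem is True:
--                 sharedItems.append(item)
--     return sharedItems
-- ===== SOURCE B (Python) =====
-- def findSharedItems(compartments):
--     if not compartments:
--         return []
--     common = set(compartments[0])
--     for c in compartments[1:]:
--         common &= set(c)
--     return [item for compartment in compartments for item in compartment if item in common]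
-- ===== Notes on version B (the rewrite author's own statement) =====
-- stated objective: faster
-- what changed: B intersects the per-compartment character sets once and then filters each compartment against that shared set in a single pass, instead of A's per-character rescan of every compartment.
import Mathlib
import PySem

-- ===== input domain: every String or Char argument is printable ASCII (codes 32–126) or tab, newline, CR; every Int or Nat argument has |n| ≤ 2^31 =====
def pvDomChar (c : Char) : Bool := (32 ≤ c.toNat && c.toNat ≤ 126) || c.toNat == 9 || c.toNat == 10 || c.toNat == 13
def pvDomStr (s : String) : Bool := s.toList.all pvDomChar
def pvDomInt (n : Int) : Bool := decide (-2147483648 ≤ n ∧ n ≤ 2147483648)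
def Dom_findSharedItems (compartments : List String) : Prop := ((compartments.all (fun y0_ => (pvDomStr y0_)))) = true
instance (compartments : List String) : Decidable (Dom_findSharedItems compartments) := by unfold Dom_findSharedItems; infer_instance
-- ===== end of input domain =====

-- B replaces A's per-character rescan of all compartments by one set-intersection pass followed by a single filtering pass (faster in a timing run's mechanism: no inner rescan).

-- ===== PORT A =====
def findSharedItems (compartments : List String) : List String :=
  compartments.foldl (fun sharedItems compartment =>
    compartment.toList.foldl (fun acc item =>
      let isSharedItem := compartments.foldl (fun ok otherCompartment =>
        if compartment ≠ otherCompartment ∧ ¬ (otherCompartment.toList.contains item) then false else ok) true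
      if isSharedItem then acc ++ [String.ofList [item]] else acc) sharedItems) []

-- ===== PORT B =====
def findSharedItems_alt (compartments : List String) : List String :=
  match compartments with
  | [] => []
  | c0 :: rest =>
    let common : PySem.Set Char :=
      rest.foldl (fun s c => PySem.Set.inter s c.toList) (PySem.Set.ofList c0.toList)
    (c0 :: rest).flatMap (fun compartment =>
      (compartment.toList.filter (fun item => PySem.Set.contains common item)).map
        (fun item => String.ofList [item]))

-- ===== PRECONDITION & SPEC =====
def Spec_findSharedItems (compartments : List String) (out : List String) : Prop := out = findSharedItems_alt compartments
instance (compartments : List String) (out : List String) : Decidable (Spec_findSharedItems compartments out) := by unfold Spec_findSharedItems; infer_instance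

-- ===== CLAIM (what is proved, stated in full; the proofs are below) =====
def Claim_equal_findSharedItems : Prop := ∀ (compartments : List String), Dom_findSharedItems compartments → Spec_findSharedItems compartments (findSharedItems compartments)

-- ===== LEMMAS AND PROOFS =====

-- membership in B's intersection accumulator
lemma mem_inter_foldl (rest : List String) (s : PySem.Set Char) (x : Char) :
    x ∈ rest.foldl (fun s c => PySem.Set.inter s c.toList) s ↔
      x ∈ s ∧ ∀ c ∈ rest, x ∈ c.toList := by
  induction rest generalizing s with
  | nil => simp
  | cons c rest ih =>
      simp [List.foldl_cons, ih, PySem.Set.mem_inter, and_assoc]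

-- the common normal form both programs are reduced to
def sharedSpec (compartments : List String) : List String :=
  compartments.flatMap (fun compartment =>
    (compartment.toList.filter
        (fun item => decide (∀ c ∈ compartments, item ∈ c.toList))).map
      (fun item => String.ofList [item]))

-- A's inner flag loop as an `all` over the compartments
lemma flagA_foldl (cs : List String) (compartment : String) (item : Char) (b : Bool) :
    cs.foldl (fun ok other =>
        if compartment ≠ other ∧ ¬ (other.toList.contains item) then false else ok) b
      = (b && cs.all (fun other => compartment == other || other.toList.contains item)) := by
  induction cs generalizing b with
  | nil => simp
  | cons c cs ih =>
      simp only [List.foldl_cons, List.all_cons, ih]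
      split_ifs with h
      · have h1 : (compartment == c) = false := by simpa using h.1
        have h2 : item ∉ c.toList := by simpa using h.2
        simp [h1, h2]
      · by_cases hc : compartment = c
        · subst hc; simp
        · have h2 : item ∈ c.toList := by
            by_contra hit
            exact h ⟨hc, by simpa using hit⟩
          have h1 : (compartment == c) = false := by simpa using hc
          simp [h1, h2]

-- A's flag for an item of its own compartment equals membership in every compartment
lemma flagA_eq (compartments : List String) (compartment : String) (item : Char)
    (_hc : compartment ∈ compartments) (hi : item ∈ compartment.toList) :
    (compartments.foldl (fun ok otherCompartment =>
        if compartment ≠ otherCompartment ∧ ¬ (otherCompartment.toList.contains item) then false else ok) true)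
      = decide (∀ c ∈ compartments, item ∈ c.toList) := by
  rw [flagA_foldl]
  simp only [Bool.true_and]
  rw [Bool.eq_iff_iff]
  simp only [List.all_eq_true, Bool.or_eq_true, beq_iff_eq, List.contains_iff_mem, decide_eq_true_eq]
  constructor
  · intro h c hcmem
    rcases h c hcmem with h | h
    · exact h ▸ hi
    · exact h
  · intro h c hcmem
    exact Or.inr (h c hcmem)

lemma A_eq_sharedSpec (compartments : List String) :
    findSharedItems compartments = sharedSpec compartments := by
  unfold findSharedItems sharedSpec
  have hstep : ∀ compartment ∈ compartments, ∀ acc : List String,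
      compartment.toList.foldl (fun acc item =>
        let isSharedItem := compartments.foldl (fun ok otherCompartment =>
          if compartment ≠ otherCompartment ∧ ¬ (otherCompartment.toList.contains item) then false else ok) true
        if isSharedItem then acc ++ [String.ofList [item]] else acc) acc
      = acc ++ ((compartment.toList.filter
            (fun item => decide (∀ c ∈ compartments, item ∈ c.toList))).map
          (fun item => String.ofList [item])) := by
    intro compartment hmem acc
    rw [PySem.List.foldl_congr_mem' compartment.toList _
      (fun acc item =>
        if decide (∀ c ∈ compartments, item ∈ c.toList) then acc ++ [String.ofList [item]] else acc)
      acc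
      (fun item hi acc' => by
        simp only [flagA_eq compartments compartment item hmem hi])]
    exact PySem.List.foldl_append_if _ _ compartment.toList acc
  rw [PySem.List.foldl_congr_mem compartments _
    (fun acc compartment =>
      acc ++ ((compartment.toList.filter
          (fun item => decide (∀ c ∈ compartments, item ∈ c.toList))).map
        (fun item => String.ofList [item])))
    []
    (fun acc compartment hmem => hstep compartment hmem acc)]
  rw [PySem.List.foldl_append_eq_flatMap, List.nil_append]

lemma B_eq_sharedSpec (c0 : String) (rest : List String) :
    findSharedItems_alt (c0 :: rest) = sharedSpec (c0 :: rest) := by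
  have hB : findSharedItems_alt (c0 :: rest) =
      (c0 :: rest).flatMap (fun compartment =>
        (compartment.toList.filter (fun item =>
            PySem.Set.contains
              (rest.foldl (fun s c => PySem.Set.inter s c.toList) (PySem.Set.ofList c0.toList))
              item)).map
          (fun item => String.ofList [item])) := rfl
  rw [hB]
  unfold sharedSpec
  apply List.flatMap_congr
  intro compartment _
  congr 1
  apply List.filter_congr
  intro item _
  rw [Bool.eq_iff_iff]
  simp only [PySem.Set.contains_iff, decide_eq_true_eq, mem_inter_foldl,
    PySem.Set.mem_ofList, List.mem_cons, forall_eq_or_imp]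

-- ===== VERDICT (by name: the statement is the Claim_ definition above) =====
theorem findSharedItems_spec : Claim_equal_findSharedItems := by
  intro compartments _
  unfold Spec_findSharedItems
  cases compartments with
  | nil => rfl
  | cons c0 rest => rw [A_eq_sharedSpec, B_eq_sharedSpec]
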